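-- pv_equiv track=rewrite | github.com/GlassyFoozle/TrtDnnSplitting | src/splitting/selective_split.py | active_boundaries_to_mask
-- ===== SOURCE A (Python) =====
-- from typing import List, Sequence, Tuple
--
-- def active_boundaries_to_mask(
--     active_indices: Sequence[int],
--     n_base_chunks: int,
-- ) -> List[int]:
--     """
--     Build a mask from a list of active boundary indices.
--
--     Boundary index i is active (1) if i appears in active_indices.
--     All other boundaries are 0 (merged).
--     """
--     n_boundaries = n_base_chunks - 1
--     mask = [0] * n_boundaries
--     for idx in active_indices:
--         if not (0 <= idx < n_boundaries):
--             raise ValueError(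
--                 f"Boundary index {idx} is out of range [0, {n_boundaries - 1}]"
--             )
--         mask[idx] = 1
--     return mask
-- ===== SOURCE B (Python) =====
-- def active_boundaries_to_mask(active_indices, n_base_chunks):
--     n_boundaries = n_base_chunks - 1
--     for idx in active_indices:
--         if not (0 <= idx < n_boundaries):
--             raise ValueError(
--                 f"Boundary index {idx} is out of range [0, {n_boundaries - 1}]"
--             )
--     mask = []
--     prev = -1
--     for idx in sorted(set(active_indices)):
--         mask.extend([0] * (idx - prev - 1))
--         mask.append(1)
--         prev = idx
--     mask.extend([0] * (n_boundaries - prev - 1))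
--     return mask
-- ===== Notes on version B (the rewrite author's own statement) =====
-- stated objective: alternative
-- what changed: A scatter-writes 1s into a preallocated zero list; B validates, sorts the distinct active indices, and emits the mask as concatenated runs of zeros and single 1s between consecutive sorted indices (run-length construction, no indexed writes).
import Mathlib
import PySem

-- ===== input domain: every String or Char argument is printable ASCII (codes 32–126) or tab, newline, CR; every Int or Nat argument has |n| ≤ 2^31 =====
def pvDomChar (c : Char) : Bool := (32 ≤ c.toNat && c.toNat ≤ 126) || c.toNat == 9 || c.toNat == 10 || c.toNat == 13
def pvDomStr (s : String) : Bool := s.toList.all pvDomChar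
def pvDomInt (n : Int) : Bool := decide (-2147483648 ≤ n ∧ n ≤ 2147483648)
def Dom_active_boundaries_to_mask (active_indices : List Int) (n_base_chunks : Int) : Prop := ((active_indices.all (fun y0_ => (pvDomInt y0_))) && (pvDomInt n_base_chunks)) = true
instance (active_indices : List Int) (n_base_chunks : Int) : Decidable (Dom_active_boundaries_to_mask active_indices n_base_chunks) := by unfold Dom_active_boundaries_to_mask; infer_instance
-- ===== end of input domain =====

-- B replaces A's indexed scatter into a preallocated zero list by a sort-based
-- run-length builder: sort the distinct active indices and emit the mask as
-- concatenated zero-runs and single 1s. Alternative algorithm, similar cost.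

-- ===== PORT A =====
-- Python: mask = [0]*n_boundaries; for idx: if out of range raise ValueError (excluded by Pre_), else mask[idx] = 1.
def active_boundaries_to_mask (active_indices : List Int) (n_base_chunks : Int) : List Int :=
  let n_boundaries := n_base_chunks - 1
  active_indices.foldl
    (fun mask idx =>
      if 0 ≤ idx ∧ idx < n_boundaries then PySem.List.pySetD mask idx 1
      else mask)  -- Python raises ValueError here; such inputs are outside Pre_
    (List.replicate n_boundaries.toNat 0)

-- ===== PORT B =====
-- Python: a validation loop (raises ValueError on a bad index — outside Pre_, no effect inside it),
-- then mask = [] ; prev = -1 ; for idx in sorted(set(active_indices)): extend zeros, append 1; trailing zeros.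
def active_boundaries_to_mask_alt (active_indices : List Int) (n_base_chunks : Int) : List Int :=
  let n_boundaries := n_base_chunks - 1
  let sortedActive := PySem.List.sorted (PySem.Set.ofList active_indices) (fun x => x) false
  let st := sortedActive.foldl
    (fun (acc : List Int × Int) idx =>
      (acc.1 ++ List.replicate (idx - acc.2 - 1).toNat 0 ++ [1], idx))
    ([], -1)
  st.1 ++ List.replicate (n_boundaries - st.2 - 1).toNat 0

-- ===== PRECONDITION & SPEC =====
-- Pre_ admits exactly the inputs on which Python A returns (every active index in range);
-- on any other input A raises ValueError.
def Pre_active_boundaries_to_mask (active_indices : List Int) (n_base_chunks : Int) : Prop :=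
  ∀ idx ∈ active_indices, 0 ≤ idx ∧ idx < n_base_chunks - 1
instance (active_indices : List Int) (n_base_chunks : Int) : Decidable (Pre_active_boundaries_to_mask active_indices n_base_chunks) := by unfold Pre_active_boundaries_to_mask; infer_instance

def pvWitness_active_boundaries_to_mask : List Int × Int := ([0, 2, 2], 4)

def Spec_active_boundaries_to_mask (active_indices : List Int) (n_base_chunks : Int) (out : List Int) : Prop := out = active_boundaries_to_mask_alt active_indices n_base_chunks
instance (active_indices : List Int) (n_base_chunks : Int) (out : List Int) : Decidable (Spec_active_boundaries_to_mask active_indices n_base_chunks out) := by unfold Spec_active_boundaries_to_mask; infer_instance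

-- ===== CLAIM =====
def Claim_equal_active_boundaries_to_mask : Prop := ∀ (active_indices : List Int) (n_base_chunks : Int), Dom_active_boundaries_to_mask active_indices n_base_chunks → Pre_active_boundaries_to_mask active_indices n_base_chunks → Spec_active_boundaries_to_mask active_indices n_base_chunks (active_boundaries_to_mask active_indices n_base_chunks)

-- ===== LEMMAS AND PROOFS =====

-- A's scatter loop preserves the mask length.
theorem scatterLen (n : Int) (xs : List Int) (m : List Int) :
    (xs.foldl (fun mask idx => if 0 ≤ idx ∧ idx < n then PySem.List.pySetD mask idx 1 else mask) m).length = m.length := by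
  induction xs generalizing m with
  | nil => rfl
  | cons x xs ih =>
      simp only [List.foldl_cons]
      rw [ih]
      split_ifs with h
      · rw [PySem.List.pySetD_of_nonneg _ _ h.1, List.length_set]
      · rfl

-- Pointwise value of A's scatter loop: position i holds 1 iff i occurs in xs, else the old entry.
theorem scatterGet (n : Int) (xs : List Int) (h : ∀ x ∈ xs, 0 ≤ x ∧ x < n)
    (m : List Int) (hm : m.length = n.toNat) (i : Nat) (hi : i < m.length) :
    (xs.foldl (fun mask idx => if 0 ≤ idx ∧ idx < n then PySem.List.pySetD mask idx 1 else mask) m).getD i 0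
      = if (i : Int) ∈ xs then 1 else m.getD i 0 := by
  induction xs generalizing m with
  | nil => simp
  | cons x xs ih =>
      have hx := h x (List.mem_cons_self)
      simp only [List.foldl_cons, if_pos hx]
      rw [PySem.List.pySetD_of_nonneg _ _ hx.1]
      have hlen : (m.set x.toNat 1).length = n.toNat := by rw [List.length_set]; exact hm
      rw [ih (fun y hy => h y (List.mem_cons_of_mem _ hy)) _ hlen (by rw [List.length_set]; exact hi)]
      have hxlt : x.toNat < m.length := by omega
      by_cases hmem : (i : Int) ∈ xs
      · simp [hmem]
      · by_cases hix : (i : Int) = x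
        · have : i = x.toNat := by omega
          subst this
          simp [hix, List.getD, List.getElem?_set_self hxlt]
        · have hne : x.toNat ≠ i := by omega
          simp [hmem, hix, List.getD, List.getElem?_set_ne hne]

-- Recursive description of B's run-length builder.
def runBuild (p : Int) (l : List Int) (n : Int) : List Int :=
  match l with
  | [] => List.replicate (n - p - 1).toNat 0
  | x :: t => List.replicate (x - p - 1).toNat 0 ++ 1 :: runBuild x t n

-- B's fold (plus trailing zeros) computes runBuild.
theorem foldRun (n : Int) (l : List Int) (m : List Int) (p : Int) :
    (l.foldl (fun (acc : List Int × Int) idx =>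
        (acc.1 ++ List.replicate (idx - acc.2 - 1).toNat 0 ++ [1], idx)) (m, p)).1
      ++ List.replicate (n - (l.foldl (fun (acc : List Int × Int) idx =>
        (acc.1 ++ List.replicate (idx - acc.2 - 1).toNat 0 ++ [1], idx)) (m, p)).2 - 1).toNat 0
      = m ++ runBuild p l n := by
  induction l generalizing m p with
  | nil => simp [runBuild]
  | cons x t ih =>
      simp only [List.foldl_cons, runBuild]
      rw [ih]
      simp

-- runBuild over a strictly increasing list in (p, n) is the membership gather over range(p+1, n).
theorem runBuild_gather (l : List Int) (p n : Int) (hs : l.Pairwise (· < ·))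
    (hb : ∀ x ∈ l, p < x ∧ x < n) :
    runBuild p l n = (PySem.List.pyRange (p+1) n 1).map (fun i => if i ∈ l then (1:Int) else 0) := by
  induction l generalizing p with
  | nil =>
      simp only [runBuild, List.not_mem_nil, PySem.List.pyRange_one]
      by_cases h : p + 1 ≤ n
      · rw [List.map_map]
        have h1 : (n - (p+1)).toNat = (n - p - 1).toNat := by omega
        rw [h1]
        simp [Function.comp_def]
      · have h1 : (n - p - 1).toNat = 0 := by omega
        have h2 : (n - (p+1)).toNat = 0 := by omega
        simp [h1, h2]
  | cons x t ih =>
      have hx := hb x List.mem_cons_self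
      have hxt : ∀ y ∈ t, x < y := by
        intro y hy; exact (List.pairwise_cons.mp hs).1 y hy
      have hsplit : PySem.List.pyRange (p+1) n 1
          = PySem.List.pyRange (p+1) x 1 ++ PySem.List.pyRange x n 1 :=
        PySem.List.pyRange_one_append _ _ _ (by omega) (by omega)
      have hcons : PySem.List.pyRange x n 1 = x :: PySem.List.pyRange (x+1) n 1 :=
        PySem.List.pyRange_one_cons hx.2
      rw [hsplit, hcons, List.map_append, List.map_cons]
      have hmemx : x ∈ x :: t := List.mem_cons_self
      rw [if_pos hmemx]
      -- first segment: all positions below x, none is in x :: t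
      have hseg1 : (PySem.List.pyRange (p+1) x 1).map (fun i => if i ∈ x :: t then (1:Int) else 0)
          = List.replicate (x - p - 1).toNat 0 := by
        rw [List.eq_replicate_iff]
        constructor
        · simp [PySem.List.length_pyRange_one]; omega
        · intro b hb'
          obtain ⟨i, hi, rfl⟩ := List.mem_map.mp hb'
          have := PySem.List.mem_pyRange_one.mp hi
          have : i ∉ x :: t := by
            intro hc
            rcases List.mem_cons.mp hc with rfl | hc
            · omega
            · have := hxt i hc; omega
          simp [this]
      -- tail segment: membership in x :: t equals membership in t for i > x
      have hseg2 : (PySem.List.pyRange (x+1) n 1).map (fun i => if i ∈ x :: t then (1:Int) else 0)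
          = (PySem.List.pyRange (x+1) n 1).map (fun i => if i ∈ t then (1:Int) else 0) := by
        apply List.map_congr_left
        intro i hi
        have hir := PySem.List.mem_pyRange_one.mp hi
        have hne : i ≠ x := by omega
        simp [List.mem_cons, hne]
      rw [hseg1, hseg2, ← ih x (List.pairwise_cons.mp hs).2
            (fun y hy => ⟨hxt y hy, (hb y (List.mem_cons_of_mem _ hy)).2⟩)]
      simp [runBuild]

-- ===== VERDICT =====
theorem active_boundaries_to_mask_spec : Claim_equal_active_boundaries_to_mask := by
  intro xs nb _ hpre
  unfold Spec_active_boundaries_to_mask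
  unfold active_boundaries_to_mask active_boundaries_to_mask_alt
  simp only []
  set n := nb - 1 with hn
  set l := PySem.List.sorted (PySem.Set.ofList xs) (fun x => x) false with hl
  have hmeml : ∀ i : Int, i ∈ l ↔ i ∈ xs := by
    intro i
    rw [hl, PySem.List.mem_sorted, PySem.Set.mem_ofList]
  have hpl : l.Pairwise (· < ·) := PySem.List.sorted_ofList_pairwise_lt xs
  have hbl : ∀ x ∈ l, (-1 : Int) < x ∧ x < n := by
    intro x hx
    have := hpre x ((hmeml x).mp hx)
    omega
  rw [foldRun, List.nil_append, runBuild_gather l (-1) n hpl hbl]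
  apply List.ext_getElem
  · rw [scatterLen, List.length_replicate, List.length_map, PySem.List.length_pyRange_one]
    omega
  · intro i h1 h2
    have hiA : i < (List.replicate n.toNat (0:Int)).length := by
      rw [scatterLen, List.length_replicate] at h1; simpa using h1
    have hA := scatterGet n xs hpre (List.replicate n.toNat 0) (by simp) i hiA
    rw [List.getD_eq_getElem _ _ h1] at hA
    rw [hA, List.getElem_map, PySem.List.getElem_pyRange_one]
    have : (-1 : Int) + 1 + i = (i : Int) := by omega
    rw [this]
    by_cases hmem : (i : Int) ∈ xs <;> simp [hmem, hmeml]
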